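-- pv_equiv track=rewrite | github.com/Joao-Lucas-Pontes-Freitas/ORI | Pratica 2/otimizados/terceiro.py | construir_vocabulario
-- ===== SOURCE A (Python) =====
-- def construir_vocabulario(documentos, consulta):
--     """
--     Constrói um vocabulário ordenado sem duplicatas.
--     """
--     termos = set()
--     for doc in documentos:
--         termos.update(doc)
--     for termo in consulta:
--         if termo not in termos:
--             termos.add(termo)
--     return sorted(termos)
-- ===== SOURCE B (Python) =====
-- def construir_vocabulario(documentos, consulta):
--     todos = []
--     for doc in documentos:
--         todos.extend(doc)
--     todos.extend(consulta)
--     todos.sort()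
--     vocab = []
--     for t in todos:
--         if not vocab or vocab[-1] != t:
--             vocab.append(t)
--     return vocab
-- ===== Notes on version B (the rewrite author's own statement) =====
-- stated objective: alternative
-- what changed: Replaces the maintained hash-set with a flatten-then-sort pass followed by a single linear adjacent-duplicate removal over the sorted list.
import Mathlib
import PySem

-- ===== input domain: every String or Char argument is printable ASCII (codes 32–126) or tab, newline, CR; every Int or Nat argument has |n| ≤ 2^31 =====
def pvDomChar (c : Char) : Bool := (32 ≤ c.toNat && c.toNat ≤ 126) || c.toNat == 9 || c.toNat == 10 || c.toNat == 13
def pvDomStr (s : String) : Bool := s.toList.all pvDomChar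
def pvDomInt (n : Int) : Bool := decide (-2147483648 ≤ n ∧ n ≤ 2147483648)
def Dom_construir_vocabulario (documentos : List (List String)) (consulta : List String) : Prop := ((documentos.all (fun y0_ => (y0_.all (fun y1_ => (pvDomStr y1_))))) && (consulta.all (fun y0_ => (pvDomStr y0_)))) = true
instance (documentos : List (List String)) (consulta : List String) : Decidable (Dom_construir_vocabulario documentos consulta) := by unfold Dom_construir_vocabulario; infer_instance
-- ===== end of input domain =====

-- B replaces A's maintained hash-set with flatten + one sort + a linear adjacent-duplicate pass (alternative algorithm, same cost).


-- ===== PORT A =====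
def construir_vocabulario (documentos : List (List String)) (consulta : List String) : List String :=
  let termos : PySem.Set String := PySem.Set.empty
  let termos := documentos.foldl (fun s doc => PySem.Set.update s doc) termos
  let termos := consulta.foldl (fun s termo => if PySem.Set.contains s termo then s else PySem.Set.add s termo) termos
  PySem.List.sorted termos (fun x => x) false

-- ===== PORT B =====
def construir_vocabulario_alt (documentos : List (List String)) (consulta : List String) : List String :=
  let todos : List String := []
  let todos := documentos.foldl (fun acc doc => acc ++ doc) todos
  let todos := todos ++ consulta
  let todos := PySem.List.sorted todos (fun x => x) false
  todos.foldl (fun vocab t => if vocab = [] ∨ vocab.getLast? ≠ some t then vocab ++ [t] else vocab) []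

-- ===== PRECONDITION & SPEC =====
def Spec_construir_vocabulario (documentos : List (List String)) (consulta : List String) (out : List String) : Prop := out = construir_vocabulario_alt documentos consulta
instance (documentos : List (List String)) (consulta : List String) (out : List String) : Decidable (Spec_construir_vocabulario documentos consulta out) := by unfold Spec_construir_vocabulario; infer_instance

-- ===== CLAIM (what is proved, stated in full; the proofs are below) =====
def Claim_equal_construir_vocabulario : Prop := ∀ (documentos : List (List String)) (consulta : List String), Dom_construir_vocabulario documentos consulta → Spec_construir_vocabulario documentos consulta (construir_vocabulario documentos consulta)

-- ===== LEMMAS AND PROOFS =====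

-- A's document loop is one long fold of Set.add over the flattened documents
lemma foldl_update_eq_foldl_add (docs : List (List String)) (s : PySem.Set String) :
    docs.foldl (fun s doc => PySem.Set.update s doc) s = docs.flatten.foldl PySem.Set.add s := by
  induction docs generalizing s with
  | nil => rfl
  | cons d t ih =>
    rw [List.foldl_cons, ih (PySem.Set.update s d)]
    show List.foldl PySem.Set.add (List.foldl PySem.Set.add s d) t.flatten = _
    rw [List.flatten_cons, List.foldl_append]

-- A's guarded insertion is exactly Set.add
lemma step_eq_add (s : PySem.Set String) (t : String) :
    (if PySem.Set.contains s t then s else PySem.Set.add s t) = PySem.Set.add s t := by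
  by_cases h : PySem.Set.contains s t
  · rw [if_pos h, PySem.Set.add, if_pos h]
  · rw [if_neg h]

-- in a strictly increasing list the last element is maximal
lemma le_getLast_of_pairwise_lt : ∀ (acc : List String) (a m : String),
    acc.Pairwise (· < ·) → a ∈ acc → acc.getLast? = some m → a ≤ m
  | [], a, m, _, ha, _ => absurd ha (List.not_mem_nil)
  | [_], _, _, _, ha, hm => by simp_all
  | x :: y :: u, a, m, hp, ha, hm => by
    have hm' : (y :: u).getLast? = some m := by simpa using hm
    rcases List.mem_cons.mp ha with rfl | ha
    · have hmem : m ∈ y :: u := List.mem_of_getLast? hm'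
      exact le_of_lt ((List.pairwise_cons.mp hp).1 m hmem)
    · exact le_getLast_of_pairwise_lt (y :: u) a m (List.pairwise_cons.mp hp).2 ha hm'

-- the adjacent-dedup fold: invariant over an (· ≤ ·)-sorted remainder
lemma dedup_fold (l acc : List String)
    (hl : l.Pairwise (· ≤ ·))
    (hacc : acc.Pairwise (· < ·))
    (hc : ∀ a ∈ acc, ∀ x ∈ l, a ≤ x) :
    (l.foldl (fun vocab t => if vocab = [] ∨ vocab.getLast? ≠ some t then vocab ++ [t] else vocab) acc).Pairwise (· < ·) ∧
    (∀ y, y ∈ l.foldl (fun vocab t => if vocab = [] ∨ vocab.getLast? ≠ some t then vocab ++ [t] else vocab) acc ↔ y ∈ acc ∨ y ∈ l) := by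
  induction l generalizing acc with
  | nil => exact ⟨hacc, by simp⟩
  | cons t l ih =>
    have hhead : ∀ x ∈ l, t ≤ x := (List.pairwise_cons.mp hl).1
    have hl' : l.Pairwise (· ≤ ·) := (List.pairwise_cons.mp hl).2
    by_cases hcond : acc = [] ∨ acc.getLast? ≠ some t
    · -- append t
      have hlt : ∀ a ∈ acc, a < t := by
        intro a ha
        rcases hcond with rfl | hne
        · cases ha
        · have hne2 : acc ≠ [] := by rintro rfl; cases ha
          have hmlast : acc.getLast? = some (acc.getLast hne2) :=
            List.getLast?_eq_some_getLast hne2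
          have hle : a ≤ acc.getLast hne2 :=
            le_getLast_of_pairwise_lt acc a _ hacc ha hmlast
          have hltm : acc.getLast hne2 ≤ t := hc _ (List.getLast_mem hne2) t (by simp)
          have hnet : acc.getLast hne2 ≠ t := by
            intro h; exact hne (h ▸ hmlast)
          exact lt_of_le_of_lt hle (lt_of_le_of_ne hltm hnet)
      have hacc' : (acc ++ [t]).Pairwise (· < ·) := by
        rw [List.pairwise_append]
        exact ⟨hacc, List.pairwise_singleton _ _,
          by intro a ha b hb; simp only [List.mem_singleton] at hb; subst hb; exact hlt a ha⟩
      have hc' : ∀ a ∈ acc ++ [t], ∀ x ∈ l, a ≤ x := by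
        intro a ha x hx
        rcases List.mem_append.mp ha with ha | ha
        · exact hc a ha x (by simp [hx])
        · simp only [List.mem_singleton] at ha; subst ha; exact hhead x hx
      have hres := ih (acc ++ [t]) hl' hacc' hc'
      simp only [List.foldl_cons, if_pos hcond]
      refine ⟨hres.1, fun y => ?_⟩
      rw [hres.2 y]
      simp only [List.mem_append, List.mem_cons]
      tauto
    · -- skip: t is already the last element of acc
      rw [not_or, not_not] at hcond
      have htacc : t ∈ acc := List.mem_of_getLast? hcond.2
      have hc' : ∀ a ∈ acc, ∀ x ∈ l, a ≤ x := fun a ha x hx => hc a ha x (by simp [hx])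
      have hres := ih acc hl' hacc hc'
      simp only [List.foldl_cons,
        if_neg (not_or.mpr ⟨hcond.1, not_not_intro hcond.2⟩)]
      refine ⟨hres.1, fun y => ?_⟩
      rw [hres.2 y]
      simp only [List.mem_cons]
      constructor
      · rintro (h | h) <;> tauto
      · rintro (h | rfl | h) <;> [exact Or.inl h; exact Or.inl htacc; exact Or.inr h]

-- ===== VERDICT (by name: the statement is the Claim_ definition above) =====
theorem construir_vocabulario_spec : Claim_equal_construir_vocabulario := by
  intro documentos consulta _
  unfold Spec_construir_vocabulario construir_vocabulario construir_vocabulario_alt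
  simp only [foldl_update_eq_foldl_add, step_eq_add, PySem.List.foldl_append_eq_flatten,
    List.nil_append]
  set U : List String := documentos.flatten ++ consulta with hU
  have hA : consulta.foldl (fun s termo => PySem.Set.add s termo)
      (documentos.flatten.foldl PySem.Set.add PySem.Set.empty) = PySem.Set.ofList U := by
    rw [PySem.Set.ofList_eq_foldl, hU, List.foldl_append]
    rfl
  rw [hA]
  set S := PySem.List.sorted U (fun x => x) false with hS
  have hsorted : S.Pairwise (· ≤ ·) := by
    have := PySem.List.sorted_pairwise (xs := U) (key := fun x => x)
    simpa [hS] using this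
  have hd := dedup_fold S [] hsorted (by simp) (by simp)
  set R := S.foldl (fun vocab t => if vocab = [] ∨ vocab.getLast? ≠ some t then vocab ++ [t] else vocab) [] with hR
  have hmemR : ∀ y, y ∈ R ↔ y ∈ U := by
    intro y
    rw [hR, hd.2 y, hS]
    simp [PySem.List.mem_sorted]
  have hnodupR : R.Nodup := hd.1.imp ne_of_lt
  have hperm : R.Perm (PySem.Set.ofList U) := by
    rw [List.perm_ext_iff_of_nodup hnodupR (PySem.Set.nodup_ofList U)]
    intro y
    rw [hmemR y, PySem.Set.mem_ofList]
  exact PySem.List.sorted_eq_of_perm_of_pairwise_lt _ R (fun x => x) hperm hd.1
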